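-- pv_equiv track=rewrite | github.com/Jasson-01/UBA-IP-2024 | Parciales_Python/Parcial-10-(2C-2024)/Turno Mañana/tema1-test-ej3_.py | cumple_los_asegura
-- ===== SOURCE A (Python) =====
-- def cumple_los_asegura(A_pre, A) -> bool:
--     # mismas dimensiones
--     if len(A_pre) != len(A):
--         return False
--     for i in range(len(A)):
--         if len(A_pre[i]) != len(A[i]):
--             return False
--     # valores del 1 al n exactamente una vez
--     n = len(A) * len(A[0])
--     valores = set()
--     for i in range(len(A)):
--         for j in range(len(A[i])):
--             if A[i][j] < 1 or A[i][j] > n: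
--                 return False
--             valores.add(A[i][j])
--     if len(valores) != n:
--         return False
--     # numeros distintos entre A_pre y A
--     for i in range(len(A)):
--         for j in range(len(A[i])):
--             if A_pre[i][j] == A[i][j]:
--                 return False
--     return True
-- ===== SOURCE B (Python) =====
-- def cumple_los_asegura(A_pre, A) -> bool:
--     # single fused pass: direct-address boolean table + distinct counter
--     # instead of A's staged loops with a hash set and cardinality test
--     if len(A_pre) != len(A):
--         return False
--     n = len(A) * len(A[0])
--     seen = [False] * n
--     distinct = 0
--     for p, r in zip(A_pre, A):
--         if len(p) != len(r):
--             return False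
--         for x, y in zip(p, r):
--             if y < 1 or y > n:
--                 return False
--             if x == y:
--                 return False
--             if not seen[y - 1]:
--                 seen[y - 1] = True
--                 distinct += 1
--     return distinct == n
-- ===== Notes on version B (the rewrite author's own statement) =====
-- stated objective: alternative
-- what changed: Replaces A's staged passes (dimension loop, hash-set building with bound checks, set-cardinality test, then a separate elementwise-difference loop) by one fused pass over zip(A_pre,A) maintaining a direct-address boolean table seen[0..n-1] and a distinct counter; no set and no second traversal.
import Mathlib
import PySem

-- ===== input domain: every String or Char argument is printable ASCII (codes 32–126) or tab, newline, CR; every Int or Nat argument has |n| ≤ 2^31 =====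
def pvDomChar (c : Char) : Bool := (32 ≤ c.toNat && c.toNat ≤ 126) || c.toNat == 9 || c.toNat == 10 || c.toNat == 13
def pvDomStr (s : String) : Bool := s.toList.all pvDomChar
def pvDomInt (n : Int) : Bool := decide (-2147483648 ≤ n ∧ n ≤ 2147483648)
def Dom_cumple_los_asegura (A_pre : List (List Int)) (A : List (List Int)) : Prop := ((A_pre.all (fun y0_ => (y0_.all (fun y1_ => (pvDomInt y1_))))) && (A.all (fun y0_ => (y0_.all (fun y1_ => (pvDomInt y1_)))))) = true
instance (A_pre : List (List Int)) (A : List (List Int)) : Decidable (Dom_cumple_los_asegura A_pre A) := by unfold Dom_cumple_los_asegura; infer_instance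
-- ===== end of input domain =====

-- B replaces A's staged passes (dimension loop, set building with bound checks, set-cardinality
-- test, separate difference loop) by ONE fused pass keeping a direct-address boolean table and a
-- distinct counter; same return value, different algorithmic mechanism (no set, no second pass).


-- ===== PORT A =====
-- 'for i in range(len(A)): if len(A_pre[i]) != len(A[i]): return False'
-- (reached only with len(A_pre) == len(A), so paired recursion is exact)
def pvDimsOk : List (List Int) → List (List Int) → Bool
  | p :: ps, r :: rs => if p.length ≠ r.length then false else pvDimsOk ps rs
  | _, _ => true

-- inner loop 'for j in …: if A[i][j] < 1 or A[i][j] > n: return False; valores.add(A[i][j])'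
def pvCollectRow (n : Int) : List Int → PySem.Set Int → Option (PySem.Set Int)
  | [], s => some s
  | x :: xs, s => if x < 1 ∨ x > n then none else pvCollectRow n xs (PySem.Set.add s x)

def pvCollect (n : Int) : List (List Int) → PySem.Set Int → Option (PySem.Set Int)
  | [], s => some s
  | row :: rows, s =>
    match pvCollectRow n row s with
    | none => none
    | some s' => pvCollect n rows s'

-- 'for i …: for j …: if A_pre[i][j] == A[i][j]: return False' (dimensions already equal)
def pvRowDiff : List Int → List Int → Bool
  | x :: xs, y :: ys => if x = y then false else pvRowDiff xs ys
  | _, _ => true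

def pvAllDiff : List (List Int) → List (List Int) → Bool
  | p :: ps, r :: rs => if pvRowDiff p r then pvAllDiff ps rs else false
  | _, _ => true

def cumple_los_asegura (A_pre : List (List Int)) (A : List (List Int)) : Bool :=
  if A_pre.length ≠ A.length then false
  else if ¬ pvDimsOk A_pre A then false
  else match A with
  | [] => false  -- 'A[0]' raises IndexError here (len(A_pre)=len(A)=0); excluded by Pre_
  | r0 :: _ =>
    let n : Int := (A.length : Int) * (r0.length : Int)
    match pvCollect n A PySem.Set.empty with
    | none => false
    | some valores =>
      if ((valores.length : Int) ≠ n) then false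
      else pvAllDiff A_pre A

-- ===== PORT B =====
-- inner 'for x, y in zip(p, r): …' maintaining (seen, distinct); none = early 'return False'
-- seen[y-1] is always in range here (the branch guarantees 1 ≤ y ≤ n), so .natAbs is exact
def pvRowScan (n : Int) : List (Int × Int) → List Bool × Int → Option (List Bool × Int)
  | [], st => some st
  | (x, y) :: rest, (seen, d) =>
    if y < 1 ∨ y > n then none
    else if x = y then none
    else if seen.getD (y - 1).natAbs false then pvRowScan n rest (seen, d)
    else pvRowScan n rest (seen.set (y - 1).natAbs true, d + 1)

-- outer 'for p, r in zip(A_pre, A): …'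
def pvScan (n : Int) : List (List Int × List Int) → List Bool × Int → Option (List Bool × Int)
  | [], st => some st
  | (p, r) :: rest, st =>
    if p.length ≠ r.length then none
    else match pvRowScan n (p.zip r) st with
    | none => none
    | some st' => pvScan n rest st'

def cumple_los_asegura_alt (A_pre : List (List Int)) (A : List (List Int)) : Bool :=
  if A_pre.length ≠ A.length then false
  else match A with
  | [] => false  -- 'A[0]' raises IndexError here as in A; excluded by Pre_
  | r0 :: _ =>
    let n : Int := (A.length : Int) * (r0.length : Int)
    match pvScan n (A_pre.zip A) (List.replicate n.natAbs false, 0) with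
    | none => false
    | some st => st.2 == n

-- ===== PRECONDITION & SPEC =====
-- A raises IndexError ('A[0]') exactly when both matrices are the empty list; nothing else is excluded.
def Pre_cumple_los_asegura (A_pre : List (List Int)) (A : List (List Int)) : Prop :=
  ¬ (A_pre = [] ∧ A = [])
instance (A_pre : List (List Int)) (A : List (List Int)) : Decidable (Pre_cumple_los_asegura A_pre A) := by unfold Pre_cumple_los_asegura; infer_instance

def pvWitness_cumple_los_asegura : List (List Int) × List (List Int) := ([[2]], [[1]])

def Spec_cumple_los_asegura (A_pre : List (List Int)) (A : List (List Int)) (out : Bool) : Prop := out = cumple_los_asegura_alt A_pre A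
instance (A_pre : List (List Int)) (A : List (List Int)) (out : Bool) : Decidable (Spec_cumple_los_asegura A_pre A out) := by unfold Spec_cumple_los_asegura; infer_instance

-- ===== CLAIM (what is proved, stated in full; the proofs are below) =====
def Claim_equal_cumple_los_asegura : Prop := ∀ (A_pre : List (List Int)) (A : List (List Int)), Dom_cumple_los_asegura A_pre A → Pre_cumple_los_asegura A_pre A → Spec_cumple_los_asegura A_pre A (cumple_los_asegura A_pre A)

-- ===== LEMMAS AND PROOFS =====

-- ---- A-side characterisations ----
theorem dimsOk_iff (ps rs : List (List Int)) :
    pvDimsOk ps rs = true ↔ ∀ pr ∈ ps.zip rs, pr.1.length = pr.2.length := by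
  induction ps generalizing rs with
  | nil => simp [pvDimsOk]
  | cons p ps ih =>
    cases rs with
    | nil => simp [pvDimsOk]
    | cons r rs => by_cases h : p.length = r.length <;> simp [pvDimsOk, h, ih]

theorem rowDiff_iff (xs ys : List Int) :
    pvRowDiff xs ys = true ↔ ∀ xy ∈ xs.zip ys, xy.1 ≠ xy.2 := by
  induction xs generalizing ys with
  | nil => simp [pvRowDiff]
  | cons x xs ih =>
    cases ys with
    | nil => simp [pvRowDiff]
    | cons y ys => by_cases h : x = y <;> simp [pvRowDiff, h, ih]

theorem allDiff_iff (ps rs : List (List Int)) :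
    pvAllDiff ps rs = true ↔ ∀ pr ∈ ps.zip rs, ∀ xy ∈ pr.1.zip pr.2, xy.1 ≠ xy.2 := by
  induction ps generalizing rs with
  | nil => simp [pvAllDiff]
  | cons p ps ih =>
    cases rs with
    | nil => simp [pvAllDiff]
    | cons r rs => by_cases h : pvRowDiff p r <;> simp_all [pvAllDiff, rowDiff_iff]

theorem collectRow_eq (n : Int) (xs : List Int) (s : PySem.Set Int) :
    pvCollectRow n xs s =
      if (∀ x ∈ xs, 1 ≤ x ∧ x ≤ n) then some (PySem.Set.update s xs) else none := by
  induction xs generalizing s with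
  | nil => simp [pvCollectRow, PySem.Set.update]
  | cons x xs ih =>
    by_cases h : x < 1 ∨ x > n
    · rw [pvCollectRow, if_pos h, if_neg]
      intro h'
      have := h' x (by simp)
      omega
    · have h1 : 1 ≤ x ∧ x ≤ n := by omega
      rw [pvCollectRow, if_neg h, ih, PySem.Set.update_cons]
      by_cases h2 : ∀ y ∈ xs, 1 ≤ y ∧ y ≤ n
      · rw [if_pos h2, if_pos (by simpa [h1] using h2)]
      · rw [if_neg h2, if_neg (by intro h3; exact h2 (fun y hy => h3 y (by simp [hy])))]

theorem collect_eq (n : Int) (rows : List (List Int)) (s : PySem.Set Int) :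
    pvCollect n rows s =
      if (∀ x ∈ rows.flatMap id, 1 ≤ x ∧ x ≤ n) then
        some (PySem.Set.update s (rows.flatMap id)) else none := by
  induction rows generalizing s with
  | nil => simp [pvCollect, PySem.Set.update]
  | cons row rows ih =>
    have hsplit : (∀ x ∈ (row :: rows).flatMap id, 1 ≤ x ∧ x ≤ n) ↔
        ((∀ x ∈ row, 1 ≤ x ∧ x ≤ n) ∧ (∀ x ∈ rows.flatMap id, 1 ≤ x ∧ x ≤ n)) := by
      rw [List.flatMap_cons, List.forall_mem_append, id_eq]
    rw [pvCollect, collectRow_eq]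
    by_cases h : ∀ x ∈ row, 1 ≤ x ∧ x ≤ n
    · rw [if_pos h]
      show pvCollect n rows (s.update row) = _
      rw [ih, List.flatMap_cons, PySem.Set.update_append]
      by_cases h2 : ∀ x ∈ rows.flatMap id, 1 ≤ x ∧ x ≤ n
      · rw [if_pos h2, if_pos (by rw [List.flatMap_cons] at hsplit; exact hsplit.mpr ⟨h, h2⟩)]
        rfl
      · rw [if_neg h2, if_neg (by rw [List.flatMap_cons] at hsplit; exact fun h3 => h2 (hsplit.mp h3).2)]
    · rw [if_neg h, if_neg (fun h3 => h (hsplit.mp h3).1)]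

-- ---- B-side invariant: (seen, d) represents the set s of values marked so far ----
def pvInv (n : Int) (s : PySem.Set Int) (seen : List Bool) (d : Int) : Prop :=
  seen.length = n.natAbs ∧ d = (s.length : Int) ∧
  ∀ i : Nat, (seen.getD i false = true ↔ ((i : Int) + 1) ∈ s)

theorem inv_step (n y : Int) (s : PySem.Set Int) (seen : List Bool) (d : Int)
    (hInv : pvInv n s seen d) (h1 : 1 ≤ y) (h2 : y ≤ n) :
    (if seen.getD (y - 1).natAbs false then pvInv n (PySem.Set.add s y) seen d
     else pvInv n (PySem.Set.add s y) (seen.set (y - 1).natAbs true) (d + 1)) := by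
  obtain ⟨hlen, hd, hmem⟩ := hInv
  have hky : (((y - 1).natAbs : Nat) : Int) + 1 = y := by omega
  by_cases hs : seen.getD (y - 1).natAbs false = true
  · have hy : y ∈ s := by rw [← hky]; exact (hmem _).mp hs
    rw [if_pos hs, PySem.Set.add_of_mem hy]
    exact ⟨hlen, hd, hmem⟩
  · have hy : y ∉ s := fun h => hs ((hmem _).mpr (by rwa [hky]))
    rw [if_neg hs, PySem.Set.add_of_not_mem hy]
    have hklt : (y - 1).natAbs < seen.length := by rw [hlen]; omega
    refine ⟨by simp [hlen], ?_, fun i => ?_⟩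
    · rw [List.length_append, List.length_singleton]
      push_cast
      omega
    · by_cases hik : i = (y - 1).natAbs
      · subst hik
        rw [List.getD_eq_getElem?_getD, List.getElem?_set_self hklt, hky]
        simp [hy]
      · rw [List.getD_eq_getElem?_getD, List.getElem?_set_ne (fun h => hik h.symm),
            ← List.getD_eq_getElem?_getD, hmem i]
        have hne : ((i : Int)) + 1 ≠ y := fun h => hik (by omega)
        simp [List.mem_append, hne]

theorem rowScan_eq (n : Int) (pairs : List (Int × Int)) (s : PySem.Set Int)
    (seen : List Bool) (d : Int) (hInv : pvInv n s seen d) :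
    (if ∀ p ∈ pairs, 1 ≤ p.2 ∧ p.2 ≤ n ∧ p.1 ≠ p.2 then
      ∃ st, pvRowScan n pairs (seen, d) = some st ∧
        pvInv n (PySem.Set.update s (pairs.map Prod.snd)) st.1 st.2
     else pvRowScan n pairs (seen, d) = none) := by
  induction pairs generalizing s seen d with
  | nil =>
    rw [if_pos (by simp)]
    exact ⟨(seen, d), rfl, by simpa [PySem.Set.update] using hInv⟩
  | cons p rest ih =>
    obtain ⟨x, y⟩ := p
    rw [pvRowScan]
    by_cases hr : y < 1 ∨ y > n
    · rw [if_pos hr, if_neg]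
      intro h
      have := h (x, y) (by simp)
      simp only at this
      omega
    · rw [if_neg hr]
      by_cases hxy : x = y
      · rw [if_pos hxy, if_neg]
        intro h
        exact (h (x, y) (by simp)).2.2 hxy
      · rw [if_neg hxy]
        have hstep := inv_step n y s seen d hInv (by omega) (by omega)
        rw [List.map_cons, PySem.Set.update_cons]
        by_cases hall : ∀ p ∈ rest, 1 ≤ p.2 ∧ p.2 ≤ n ∧ p.1 ≠ p.2
        · have hfull : ∀ p ∈ (x, y) :: rest, 1 ≤ p.2 ∧ p.2 ≤ n ∧ p.1 ≠ p.2 := by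
            intro q hq
            rcases List.mem_cons.mp hq with h' | h'
            · subst h'; exact ⟨by omega, by omega, hxy⟩
            · exact hall q h'
          rw [if_pos hfull]
          by_cases hs : seen.getD (y - 1).natAbs false = true
          · rw [if_pos hs]
            rw [if_pos hs] at hstep
            have := ih (PySem.Set.add s y) seen d hstep
            rwa [if_pos hall] at this
          · rw [if_neg hs]
            rw [if_neg hs] at hstep
            have := ih (PySem.Set.add s y) (seen.set (y - 1).natAbs true) (d + 1) hstep
            rwa [if_pos hall] at this
        · have hnfull : ¬ ∀ p ∈ (x, y) :: rest, 1 ≤ p.2 ∧ p.2 ≤ n ∧ p.1 ≠ p.2 :=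
            fun h => hall (fun q hq => h q (List.mem_cons_of_mem _ hq))
          rw [if_neg hnfull]
          by_cases hs : seen.getD (y - 1).natAbs false = true
          · rw [if_pos hs]
            rw [if_pos hs] at hstep
            have := ih (PySem.Set.add s y) seen d hstep
            rwa [if_neg hall] at this
          · rw [if_neg hs]
            rw [if_neg hs] at hstep
            have := ih (PySem.Set.add s y) (seen.set (y - 1).natAbs true) (d + 1) hstep
            rwa [if_neg hall] at this

theorem scan_eq (n : Int) (rows : List (List Int × List Int)) (s : PySem.Set Int)
    (seen : List Bool) (d : Int) (hInv : pvInv n s seen d) :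
    (if ∀ pr ∈ rows, pr.1.length = pr.2.length ∧ ∀ p ∈ pr.1.zip pr.2, 1 ≤ p.2 ∧ p.2 ≤ n ∧ p.1 ≠ p.2 then
      ∃ st, pvScan n rows (seen, d) = some st ∧
        pvInv n (PySem.Set.update s (rows.flatMap (fun pr => (pr.1.zip pr.2).map Prod.snd))) st.1 st.2
     else pvScan n rows (seen, d) = none) := by
  induction rows generalizing s seen d with
  | nil =>
    rw [if_pos (by simp)]
    exact ⟨(seen, d), rfl, by simpa [PySem.Set.update] using hInv⟩
  | cons pr rest ih =>
    obtain ⟨p, r⟩ := pr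
    rw [pvScan, List.flatMap_cons, PySem.Set.update_append]
    by_cases hl : p.length = r.length
    · rw [if_neg (not_not_intro hl)]
      have hrow := rowScan_eq n (p.zip r) s seen d hInv
      by_cases hfine : ∀ q ∈ p.zip r, 1 ≤ q.2 ∧ q.2 ≤ n ∧ q.1 ≠ q.2
      · rw [if_pos hfine] at hrow
        obtain ⟨st, hsome, hInv'⟩ := hrow
        rw [hsome]
        obtain ⟨seen', d'⟩ := st
        have hrec := ih (PySem.Set.update s ((p.zip r).map Prod.snd)) seen' d' hInv'
        by_cases hall : ∀ pr ∈ rest, pr.1.length = pr.2.length ∧ ∀ q ∈ pr.1.zip pr.2, 1 ≤ q.2 ∧ q.2 ≤ n ∧ q.1 ≠ q.2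
        · have hfull : ∀ pr ∈ (p, r) :: rest, pr.1.length = pr.2.length ∧ ∀ q ∈ pr.1.zip pr.2, 1 ≤ q.2 ∧ q.2 ≤ n ∧ q.1 ≠ q.2 := by
            intro q hq
            rcases List.mem_cons.mp hq with h' | h'
            · subst h'; exact ⟨hl, hfine⟩
            · exact hall q h'
          rw [if_pos hfull]
          rwa [if_pos hall] at hrec
        · rw [if_neg (fun h => hall (fun q hq => h q (List.mem_cons_of_mem _ hq)))]
          rwa [if_neg hall] at hrec
      · rw [if_neg hfine] at hrow
        rw [hrow, if_neg (fun h => hfine (h (p, r) (by simp)).2)]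
    · rw [if_pos hl, if_neg (fun h => hl (h (p, r) (by simp)).1)]

-- the initial state represents the empty set
theorem inv_init (n : Int) : pvInv n PySem.Set.empty (List.replicate n.natAbs false) 0 := by
  refine ⟨by simp, by simp [PySem.Set.empty], fun i => ?_⟩
  constructor
  · intro h
    rw [List.getD_eq_getElem?_getD, List.getElem?_replicate] at h
    by_cases hi : i < n.natAbs <;> simp [hi] at h
  · intro h
    simp [PySem.Set.empty] at h

-- snd-flattening of the zipped rows equals A's own flattening when all dimensions match
theorem zip_flat_eq (ps rs : List (List Int)) (hlen : ps.length = rs.length)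
    (hdims : ∀ pr ∈ ps.zip rs, pr.1.length = pr.2.length) :
    (ps.zip rs).flatMap (fun pr => (pr.1.zip pr.2).map Prod.snd) = rs.flatMap id := by
  induction ps generalizing rs with
  | nil =>
    cases rs with
    | nil => rfl
    | cons r rs => simp at hlen
  | cons p ps ih =>
    cases rs with
    | nil => simp at hlen
    | cons r rs =>
      have h1 : p.length = r.length := hdims (p, r) (by simp)
      have h2 : (p.zip r).map Prod.snd = r := List.map_snd_zip (le_of_eq h1.symm)
      simp only [List.zip_cons_cons, List.flatMap_cons, h2, id_eq]
      rw [ih rs (by simpa using hlen) (fun pr hpr => hdims pr (by simp [hpr]))]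

theorem cumple_los_asegura_spec' (A_pre A : List (List Int))
    (hpre : Pre_cumple_los_asegura A_pre A) :
    cumple_los_asegura A_pre A = cumple_los_asegura_alt A_pre A := by
  by_cases hlen : A_pre.length = A.length
  · cases A with
    | nil =>
      exact absurd ⟨List.length_eq_zero_iff.mp (by simpa using hlen), rfl⟩ hpre
    | cons r0 rest =>
      show cumple_los_asegura A_pre (r0 :: rest) = cumple_los_asegura_alt A_pre (r0 :: rest)
      rw [cumple_los_asegura, cumple_los_asegura_alt,
          if_neg (not_not_intro hlen), if_neg (not_not_intro hlen)]
      set n : Int := (((r0 :: rest).length : Int) * (r0.length : Int)) with hn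
      have hscan := scan_eq n (A_pre.zip (r0 :: rest)) PySem.Set.empty
        (List.replicate n.natAbs false) 0 (inv_init n)
      by_cases hdims : ∀ pr ∈ A_pre.zip (r0 :: rest), pr.1.length = pr.2.length
      · rw [if_neg (not_not_intro ((dimsOk_iff _ _).mpr hdims))]
        have hflat := zip_flat_eq A_pre (r0 :: rest) hlen hdims
        show (match pvCollect n (r0 :: rest) PySem.Set.empty with
              | none => false
              | some valores =>
                if ((valores.length : Int) ≠ n) then false
                else pvAllDiff A_pre (r0 :: rest)) =
             (match pvScan n (A_pre.zip (r0 :: rest)) (List.replicate n.natAbs false, 0) with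
              | none => false
              | some st => st.2 == n)
        rw [collect_eq]
        by_cases hfine : ∀ pr ∈ A_pre.zip (r0 :: rest), pr.1.length = pr.2.length ∧
            ∀ p ∈ pr.1.zip pr.2, 1 ≤ p.2 ∧ p.2 ≤ n ∧ p.1 ≠ p.2
        · -- all rows range-ok and elementwise different: both sides reduce to the cardinality test
          rw [if_pos hfine] at hscan
          obtain ⟨st, hsome, _, hd, _⟩ := hscan
          rw [hflat] at hd
          rw [hsome]
          have hrange : ∀ x ∈ (r0 :: rest).flatMap id, 1 ≤ x ∧ x ≤ n := by
            intro x hx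
            rw [← hflat] at hx
            simp only [List.mem_flatMap, List.mem_map] at hx
            obtain ⟨pr, hpr, q, hq, hq2⟩ := hx
            have := (hfine pr hpr).2 q hq
            omega
          rw [if_pos hrange]
          have hdiff : pvAllDiff A_pre (r0 :: rest) = true := by
            rw [allDiff_iff]
            exact fun pr hpr xy hxy => ((hfine pr hpr).2 xy hxy).2.2
          show (if ((PySem.Set.update PySem.Set.empty ((r0 :: rest).flatMap id)).length : Int) ≠ n
                then false else pvAllDiff A_pre (r0 :: rest)) = (st.2 == n)
          rw [hd, hdiff]
          by_cases hcard : ((PySem.Set.update PySem.Set.empty ((r0 :: rest).flatMap id)).length : Int) = n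
          · rw [if_neg (not_not_intro hcard)]
            exact (beq_iff_eq.mpr hcard).symm
          · rw [if_pos hcard]
            exact (beq_eq_false_iff_ne.mpr hcard).symm
        · -- some row fails: B's scan returns none; A fails at range, cardinality or difference stage
          rw [if_neg hfine] at hscan
          rw [hscan]
          by_cases hrange : ∀ x ∈ (r0 :: rest).flatMap id, 1 ≤ x ∧ x ≤ n
          · rw [if_pos hrange]
            have hnd : pvAllDiff A_pre (r0 :: rest) = false := by
              rw [← Bool.not_eq_true, allDiff_iff]
              intro hall
              apply hfine
              intro pr hpr
              refine ⟨hdims pr hpr, fun q hq => ?_⟩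
              have hmem : q.2 ∈ (r0 :: rest).flatMap id := by
                rw [← hflat]
                simp only [List.mem_flatMap, List.mem_map]
                exact ⟨pr, hpr, q, hq, rfl⟩
              have := hrange q.2 hmem
              exact ⟨this.1, this.2, hall pr hpr q hq⟩
            show (if ((PySem.Set.update PySem.Set.empty ((r0 :: rest).flatMap id)).length : Int) ≠ n
                  then false else pvAllDiff A_pre (r0 :: rest)) = false
            rw [hnd]
            split <;> rfl
          · rw [if_neg hrange]
      · rw [if_pos (show ¬ pvDimsOk A_pre (r0 :: rest) = true by rw [dimsOk_iff]; exact hdims)]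
        rw [if_neg (fun h => hdims (fun pr hpr => (h pr hpr).1))] at hscan
        show false = (match pvScan n (A_pre.zip (r0 :: rest)) (List.replicate n.natAbs false, 0) with
              | none => false
              | some st => st.2 == n)
        rw [hscan]
  · rw [cumple_los_asegura.eq_def, cumple_los_asegura_alt.eq_def, if_pos hlen, if_pos hlen]

-- ===== VERDICT (by name: the statement is the Claim_ definition above) =====
theorem cumple_los_asegura_spec : Claim_equal_cumple_los_asegura := by
  intro A_pre A _ hpre
  exact cumple_los_asegura_spec' A_pre A hpre
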